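-- pv_equiv track=rewrite | github.com/ghulammustafacomsat/dataextraction | IndicesCalculation.py | g_index_f
-- ===== SOURCE A (Python) =====
-- def Cumulative(lists):
--     cu_list = []
--     length = len(lists)
--     cu_list = [sum(lists[0:x:1]) for x in range(0, length+1)]
--     return cu_list[1:]
--
-- def g_index_f(citation,publication):
--   g_index=0
--   citation.sort(reverse=True)
--   publication.sort()
--   pub_s=[]
--   c_sum=[]
--   pub_s=[i ** 2 for i in publication]
--   c_sum=Cumulative(citation)
--   for i in range(len(publication)):
--     if (len(publication)==1 and citation[i]>=1):
--       g_index=1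
--     elif (len(publication)==1 and citation[i]==0):
--       g_index=0
--     elif(pub_s[i]<=c_sum[i]):
--       g_index=publication[i]
--   return g_index
-- ===== SOURCE B (Python) =====
-- def g_index_f(citation, publication):
--     citation.sort(reverse=True)
--     publication.sort()
--     if len(publication) == 1:
--         return 1 if citation[0] >= 1 else 0
--     g = 0
--     csum = 0
--     for i, p in enumerate(publication):
--         csum += citation[i]
--         if p * p <= csum:
--             g = p
--     return g
-- ===== Notes on version B (the rewrite author's own statement) =====
-- stated objective: faster
-- what changed: B replaces Cumulative's quadratic list of slice re-sums (plus per-index list lookups) with a single enumerate pass keeping a running prefix sum of the sorted citations, and handles the length-1 special case by a direct comparison instead of a loop.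
import Mathlib
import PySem

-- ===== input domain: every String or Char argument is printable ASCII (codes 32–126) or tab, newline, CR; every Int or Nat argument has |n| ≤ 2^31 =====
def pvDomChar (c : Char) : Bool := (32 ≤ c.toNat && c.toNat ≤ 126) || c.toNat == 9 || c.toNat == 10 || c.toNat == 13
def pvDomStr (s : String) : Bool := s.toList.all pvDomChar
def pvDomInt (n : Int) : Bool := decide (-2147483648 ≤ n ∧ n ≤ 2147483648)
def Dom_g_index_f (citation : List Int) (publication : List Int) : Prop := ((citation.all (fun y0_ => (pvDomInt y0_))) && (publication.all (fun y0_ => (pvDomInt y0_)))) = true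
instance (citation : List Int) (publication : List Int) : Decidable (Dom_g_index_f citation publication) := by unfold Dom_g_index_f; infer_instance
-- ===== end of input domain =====

-- B replaces A's quadratic Cumulative (a slice re-sum per index) by one pass with a running prefix sum (faster).
-- Both Pythons sort their arguments in place identically; the equivalence proved is about the return value.

-- ===== PORT A =====
def Cumulative (lists : List Int) : List Int :=
  let length : Int := lists.length
  let cu_list : List Int :=
    (PySem.List.pyRange 0 (length + 1) 1).map
      (fun x => (PySem.List.slice lists (some 0) (some x)).sum)
  PySem.List.slice cu_list (some 1) none

def g_index_f (citation : List Int) (publication : List Int) : Int :=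
  let citation := PySem.List.sorted citation (fun x => x) true
  let publication := PySem.List.sorted publication (fun x => x) false
  let pub_s := publication.map (fun i => i ^ 2)
  let c_sum := Cumulative citation
  (PySem.List.pyRange 0 (publication.length : Int) 1).foldl
    (fun g_index i =>
      if publication.length = 1 ∧ 1 ≤ PySem.List.pyGetD citation i 0 then 1
      else if publication.length = 1 ∧ PySem.List.pyGetD citation i 0 = 0 then 0
      else if PySem.List.pyGetD pub_s i 0 ≤ PySem.List.pyGetD c_sum i 0 then
        PySem.List.pyGetD publication i 0
      else g_index) 0

-- ===== PORT B =====
def g_index_f_alt (citation : List Int) (publication : List Int) : Int :=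
  let citation := PySem.List.sorted citation (fun x => x) true
  let publication := PySem.List.sorted publication (fun x => x) false
  if publication.length = 1 then
    if 1 ≤ PySem.List.pyGetD citation 0 0 then 1 else 0
  else
    ((PySem.List.enumerate publication 0).foldl
      (fun (st : Int × Int) ip =>
        let csum := st.2 + PySem.List.pyGetD citation ip.1 0
        (if ip.2 * ip.2 ≤ csum then ip.2 else st.1, csum))
      (0, 0)).1

-- ===== PRECONDITION & SPEC =====
-- A indexes citation (and its cumulative-sum list) at every position of publication, so it raises
-- IndexError exactly when publication is longer than citation; those inputs are excluded.
def Pre_g_index_f (citation : List Int) (publication : List Int) : Prop :=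
  publication.length ≤ citation.length
instance (citation : List Int) (publication : List Int) : Decidable (Pre_g_index_f citation publication) := by unfold Pre_g_index_f; infer_instance
def pvWitness_g_index_f : List Int × List Int := ([6, 5, 1], [2, 3, 1])

def Spec_g_index_f (citation : List Int) (publication : List Int) (out : Int) : Prop := out = g_index_f_alt citation publication
instance (citation : List Int) (publication : List Int) (out : Int) : Decidable (Spec_g_index_f citation publication out) := by unfold Spec_g_index_f; infer_instance

-- ===== CLAIM (what is proved, stated in full; the proofs are below) =====
def Claim_equal_g_index_f : Prop := ∀ (citation : List Int) (publication : List Int), Dom_g_index_f citation publication → Pre_g_index_f citation publication → Spec_g_index_f citation publication (g_index_f citation publication)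

-- ===== LEMMAS AND PROOFS =====

-- the recursion both loop bodies reduce to in the general case (publication length ≠ 1):
-- walk the sorted publications with a running prefix sum of the sorted citations, keep the last hit
def gRec (c : List Int) (p : List Int) (k : Nat) (g cs : Int) : Int :=
  match p with
  | [] => g
  | q :: rest =>
      let cs' := cs + c.getD k 0
      gRec c rest (k + 1) (if q * q ≤ cs' then q else g) cs'

lemma cumulative_eq (c : List Int) :
    Cumulative c = (List.range c.length).map (fun i => (c.take (i + 1)).sum) := by
  unfold Cumulative
  simp only [PySem.List.pyRange_one, PySem.List.slice_zero_start, PySem.List.slice_from_one]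
  have h1 : ((c.length : Int) + 1 - 0).toNat = c.length + 1 := by omega
  rw [h1, List.range_succ_eq_map]
  simp only [List.map_cons, List.map_map, List.tail_cons]
  apply List.map_congr_left
  intro a _
  simp only [Function.comp]
  rw [show ((0:Int) + ↑(a.succ)) = ((a+1 : Nat) : Int) by push_cast; ring,
      PySem.List.slice_to_natCast]

lemma cumulative_getD (c : List Int) (i : Nat) (h : i < c.length) :
    PySem.List.pyGetD ((List.range c.length).map (fun j => (c.take (j+1)).sum)) (i:Int) 0
      = (c.take (i+1)).sum := by
  rw [PySem.List.pyGetD_natCast]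
  exact PySem.List.getD_map_range _ _ _ _ h

lemma take_succ_sum (c : List Int) (k : Nat) (h : k < c.length) :
    (c.take (k + 1)).sum = (c.take k).sum + c.getD k 0 := by
  rw [List.sum_take_succ c k h]
  simp [List.getD, List.getElem?_eq_getElem h]

lemma b_fold_eq (c : List Int) (p : List Int) (s : Nat) (g cs : Int) :
    ((PySem.List.enumerate p (s : Int)).foldl
      (fun (st : Int × Int) ip =>
        let csum := st.2 + PySem.List.pyGetD c ip.1 0
        (if ip.2 * ip.2 ≤ csum then ip.2 else st.1, csum))
      (g, cs)).1 = gRec c p s g cs := by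
  induction p generalizing s g cs with
  | nil => simp [PySem.List.enumerate_nil, gRec]
  | cons q rest ih =>
    rw [PySem.List.enumerate_cons]
    simp only [List.foldl_cons, PySem.List.pyGetD_natCast]
    rw [show ((s : Int) + 1) = ((s + 1 : Nat) : Int) by push_cast; ring]
    rw [ih]
    simp [gRec]

lemma a_fold_eq (pfull c : List Int) (rest : List Int) (k : Nat) (g : Int)
    (hk : k + rest.length = pfull.length) (hlen : pfull.length ≤ c.length)
    (hdrop : pfull.drop k = rest) :
    (PySem.List.pyRange (k : Int) (pfull.length : Int) 1).foldl
      (fun g_index i =>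
        if PySem.List.pyGetD (pfull.map (fun x => x ^ 2)) i 0 ≤
            PySem.List.pyGetD ((List.range c.length).map (fun j => (c.take (j+1)).sum)) i 0 then
          PySem.List.pyGetD pfull i 0
        else g_index) g
      = gRec c rest k g ((c.take k).sum) := by
  induction rest generalizing k g with
  | nil =>
    rw [PySem.List.pyRange_one_eq_nil (by simp at hk; omega)]
    simp [gRec]
  | cons q t ih =>
    have hkl : k < pfull.length := by simp at hk; omega
    have hkc : k < c.length := lt_of_lt_of_le hkl hlen
    have hget : pfull[k]'hkl = q := by
      have := congrArg (fun l => l.head?) hdrop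
      simpa [List.head?_drop, List.getElem?_eq_getElem hkl] using this
    rw [PySem.List.pyRange_one_cons (by exact_mod_cast hkl)]
    rw [List.foldl_cons]
    rw [show ((k : Int) + 1) = ((k + 1 : Nat) : Int) by push_cast; ring]
    rw [ih (k + 1) _ (by simp at hk ⊢; omega)
        (by simpa [List.drop_drop, Nat.add_comm] using congrArg (List.drop 1) hdrop)]
    rw [cumulative_getD c k hkc]
    simp only [PySem.List.pyGetD_natCast]
    rw [take_succ_sum c k hkc]
    have h1 : (pfull.map (fun x => x ^ 2)).getD k 0 = q ^ 2 := by
      simp [List.getD, hkl, hget]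
    have h2 : pfull.getD k 0 = q := by
      simp [List.getD, List.getElem?_eq_getElem hkl, hget]
    rw [h1, h2]
    simp only [gRec]
    congr 1
    rw [show q ^ 2 = q * q by ring]

-- ===== VERDICT (by name: the statement is the Claim_ definition above) =====
theorem g_index_f_spec : Claim_equal_g_index_f := by
  intro citation publication _ hpre
  unfold Spec_g_index_f
  simp only [g_index_f, g_index_f_alt]
  set c := PySem.List.sorted citation (fun x => x) true with hc
  set p := PySem.List.sorted publication (fun x => x) false with hp
  have hplen : p.length = publication.length := PySem.List.length_sorted _ _ _
  have hclen : c.length = citation.length := PySem.List.length_sorted _ _ _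
  have hlen : p.length ≤ c.length := by rw [hplen, hclen]; exact hpre
  by_cases hp1 : p.length = 1
  · -- special length-1 branch
    obtain ⟨q, hq⟩ := List.length_eq_one_iff.mp hp1
    have hcne : 0 < c.length := by omega
    have hcne' : c ≠ [] := by intro h; rw [h] at hcne; simp at hcne
    obtain ⟨c0, ct, hc0⟩ := List.exists_cons_of_ne_nil hcne'
    rw [if_pos hp1, hq, hc0]
    rw [show ((([q] : List Int).length : Nat) : Int) = 1 by simp]
    rw [show PySem.List.pyRange (0:Int) 1 1 = [0] from by decide]
    simp only [List.foldl_cons, List.foldl_nil, PySem.List.pyGetD_zero_cons]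
    by_cases h1 : (1:Int) ≤ c0
    · rw [if_pos ⟨rfl, h1⟩, if_pos h1]
    · by_cases h2 : c0 = 0
      · rw [if_neg (by tauto), if_pos ⟨rfl, h2⟩, if_neg h1]
      · rw [if_neg (by tauto), if_neg (by tauto), cumulative_eq]
        have hcg : PySem.List.pyGetD
            (((List.range (c0 :: ct).length)).map (fun j => (((c0 :: ct).take (j+1))).sum)) 0 0 = c0 := by
          simp [PySem.List.pyGetD_zero, List.range_succ_eq_map, List.getD]
        rw [hcg]
        have hqs : PySem.List.pyGetD (([q] : List Int).map (fun i => i ^ 2)) 0 0 = q ^ 2 := by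
          simp [PySem.List.pyGetD_zero_cons]
        rw [hqs]
        have hneg : ¬ (q ^ 2 ≤ c0) := by
          have hc0neg : c0 < 0 := by omega
          intro hle
          have := sq_nonneg q
          linarith
        rw [if_neg hneg, if_neg h1]
  · -- general branch
    rw [if_neg hp1]
    have hfalse : (p.length = 1) = False := by simp [hp1]
    simp only [hfalse, false_and, if_false]
    rw [cumulative_eq]
    have HB := b_fold_eq c p 0 0 0
    simp only [Nat.cast_zero] at HB
    rw [HB]
    have HA := a_fold_eq p c p 0 0 (by omega) hlen rfl
    simp only [Nat.cast_zero, List.take_zero, List.sum_nil] at HA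
    rw [HA]
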